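-- pv_equiv track=rewrite | github.com/omaryahia4/holbertonschool-web_back_end | 0x04-pagination/0-simple_helper_function.py | index_range
-- ===== SOURCE A (Python) =====
-- from typing import Tuple
--
-- def index_range(page: int, page_size: int) -> Tuple[int, int]:
--     """function that returns a tuple of size two
--     containing a start index and an end index"""
--     count = 0
--     page_content = page_size
--     li = []
--     for i in range(page, page_size):
--         if i > 11:
--             count += 10
--     page_content += count
--     li.extend([count, page_content])
--     return tuple(li)
-- ===== SOURCE B (Python) =====
-- def index_range(page, page_size):
--     count = 10 * max(0, page_size - max(page, 12))
--     return (count, page_size + count)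
-- ===== Notes on version B (the rewrite author's own statement) =====
-- stated objective: faster
-- what changed: Replaces the counting loop over range(page, page_size) with the closed-form count = 10*max(0, page_size - max(page, 12)).
import Mathlib
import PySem

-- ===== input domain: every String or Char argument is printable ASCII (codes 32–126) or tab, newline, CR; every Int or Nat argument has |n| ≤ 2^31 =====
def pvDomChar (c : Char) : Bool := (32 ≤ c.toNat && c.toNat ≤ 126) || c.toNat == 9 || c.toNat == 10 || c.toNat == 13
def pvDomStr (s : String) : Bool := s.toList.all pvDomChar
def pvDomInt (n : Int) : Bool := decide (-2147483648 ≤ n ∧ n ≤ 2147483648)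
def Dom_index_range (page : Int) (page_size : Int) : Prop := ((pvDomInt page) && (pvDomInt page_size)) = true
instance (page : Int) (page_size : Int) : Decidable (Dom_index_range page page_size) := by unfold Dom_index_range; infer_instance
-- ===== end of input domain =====

-- B replaces A's O(page_size - page) counting loop with closed-form arithmetic (faster).

-- ===== PORT A =====
def index_range (page : Int) (page_size : Int) : Int × Int :=
  let count : Int := 0
  let page_content : Int := page_size
  let count := (PySem.List.pyRange page page_size 1).foldl
    (fun c i => if i > 11 then c + 10 else c) count
  let page_content := page_content + count
  (count, page_content)

-- ===== PORT B =====
def index_range_alt (page : Int) (page_size : Int) : Int × Int :=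
  let count := 10 * max 0 (page_size - max page 12)
  (count, page_size + count)

-- ===== PRECONDITION & SPEC =====
def Spec_index_range (page : Int) (page_size : Int) (out : Int × Int) : Prop := out = index_range_alt page page_size
instance (page : Int) (page_size : Int) (out : Int × Int) : Decidable (Spec_index_range page page_size out) := by unfold Spec_index_range; infer_instance

-- ===== CLAIM (what is proved, stated in full; the proofs are below) =====
def Claim_equal_index_range : Prop := ∀ (page : Int) (page_size : Int), Dom_index_range page page_size → Spec_index_range page page_size (index_range page page_size)

-- ===== LEMMAS AND PROOFS =====
theorem fold_count : ∀ (n : Nat) (a b acc : Int), (b - a).toNat = n →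
    (PySem.List.pyRange a b 1).foldl (fun c i => if i > 11 then c + 10 else c) acc
      = acc + 10 * max 0 (b - max a 12)
  | 0, a, b, acc, h => by
    have hb : b ≤ a := by omega
    rw [PySem.List.pyRange_one_eq_nil hb]
    simp only [List.foldl_nil, Int.max_def]
    split_ifs <;> omega
  | n+1, a, b, acc, h => by
    have hab : a < b := by omega
    rw [PySem.List.pyRange_one_cons hab]
    simp only [List.foldl_cons]
    rw [fold_count n (a+1) b _ (by omega)]
    simp only [Int.max_def]
    split_ifs <;> omega

-- ===== VERDICT (by name: the statement is the Claim_ definition above) =====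
theorem index_range_spec : Claim_equal_index_range := by
  intro page page_size _
  unfold Spec_index_range index_range index_range_alt
  simp only
  rw [fold_count (page_size - page).toNat page page_size 0 rfl]
  simp only [Prod.mk.injEq, Int.max_def]
  split_ifs <;> omega
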